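-- pv_equiv track=rewrite | github.com/rachitgour749/wealthai1-backend | stockstrategy/stockbacktester_core.py | generate_stock_description
-- ===== SOURCE A (Python) =====
-- def generate_stock_description(symbol: str) -> str:
--     """Generate intelligent stock descriptions based on symbol names"""
--     stock_mappings = {
--         'NIFTYBEES': 'Nifty 50 stock - Broad Market',
--         'BANKBEES': 'Banking Sector stock',
--         'JUNIORBEES': 'Nifty Next 50 stock - Mid Cap',
--         'ITBEES': 'Information Technology stock',
--         'PHARMABEES': 'Pharmaceutical Sector stock',
--         'INFRABEES': 'Infrastructure Sector stock',
--         'GOLDBEES': 'Gold Commodity stock',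
--         'METALIstock': 'Metal & Mining Sector stock',
--         'OILIstock': 'Oil & Gas Sector stock',
--         'LIQUIDBEES': 'Liquid Fund stock - Money Market',
--         'CPSEstock': 'CPSE (Central PSE) stock',
--         'PSUBNKBEES': 'PSU Banking stock',
--         'MON100': 'NASDAQ 100 stock - US Tech',
--         'MODEFENCE': 'Defence Sector stock',
--         'MIDCAPstock': 'Mid Cap stock',
--     }
--
--     if symbol in stock_mappings:
--         return stock_mappings[symbol]
--
--     symbol_lower = symbol.lower()
--
--     if 'pharma' in symbol_lower:
--         return 'Pharmaceutical Sector stock'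
--     elif 'bank' in symbol_lower:
--         return 'Banking Sector stock'
--     elif 'it' in symbol_lower or 'tech' in symbol_lower:
--         return 'Technology Sector stock'
--     elif 'gold' in symbol_lower:
--         return 'Gold Commodity stock'
--     elif 'oil' in symbol_lower or 'energy' in symbol_lower:
--         return 'Oil & Gas Sector stock'
--     elif 'metal' in symbol_lower:
--         return 'Metal & Mining Sector stock'
--     elif 'infra' in symbol_lower:
--         return 'Infrastructure Sector stock'
--     elif 'defence' in symbol_lower or 'defense' in symbol_lower:
--         return 'Defence Sector stock'
--     elif 'midcap' in symbol_lower or 'mid' in symbol_lower: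
--         return 'Mid Cap stock'
--     elif 'smallcap' in symbol_lower or 'small' in symbol_lower:
--         return 'Small Cap stock'
--     elif 'liquid' in symbol_lower:
--         return 'Liquid Fund stock'
--     elif 'nifty' in symbol_lower:
--         return 'Nifty Index stock'
--     elif 'sensex' in symbol_lower:
--         return 'Sensex Index stock'
--     elif 'psu' in symbol_lower:
--         return 'PSU Sector stock'
--     elif 'cpse' in symbol_lower:
--         return 'CPSE stock'
--     elif 'dividend' in symbol_lower:
--         return 'Dividend stock'
--     elif 'momentum' in symbol_lower:
--         return 'Momentum stock'
--     elif 'value' in symbol_lower: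
--         return 'Value stock'
--     elif 'quality' in symbol_lower:
--         return 'Quality stock'
--     elif any(geo in symbol_lower for geo in ['us', 'usa', 'nasdaq', 'sp500', 'dow']):
--         return 'International stock'
--     elif 'consumption' in symbol_lower or 'consumer' in symbol_lower:
--         return 'Consumer Sector stock'
--     elif 'auto' in symbol_lower:
--         return 'Automotive Sector stock'
--     elif 'realty' in symbol_lower or 'real' in symbol_lower:
--         return 'Real Estate stock'
--     elif 'healthcare' in symbol_lower or 'health' in symbol_lower:
--         return 'Healthcare Sector stock'
--     elif 'fmcg' in symbol_lower:
--         return 'FMCG Sector stock'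
--     elif 'pvt' in symbol_lower or 'private' in symbol_lower:
--         return 'Private Bank stock'
--     else:
--         return f'{symbol} stock'
-- ===== SOURCE B (Python) =====
-- _EXACT = {
--     'NIFTYBEES': 'Nifty 50 stock - Broad Market',
--     'BANKBEES': 'Banking Sector stock',
--     'JUNIORBEES': 'Nifty Next 50 stock - Mid Cap',
--     'ITBEES': 'Information Technology stock',
--     'PHARMABEES': 'Pharmaceutical Sector stock',
--     'INFRABEES': 'Infrastructure Sector stock',
--     'GOLDBEES': 'Gold Commodity stock',
--     'METALIstock': 'Metal & Mining Sector stock',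
--     'OILIstock': 'Oil & Gas Sector stock',
--     'LIQUIDBEES': 'Liquid Fund stock - Money Market',
--     'CPSEstock': 'CPSE (Central PSE) stock',
--     'PSUBNKBEES': 'PSU Banking stock',
--     'MON100': 'NASDAQ 100 stock - US Tech',
--     'MODEFENCE': 'Defence Sector stock',
--     'MIDCAPstock': 'Mid Cap stock',
-- }
--
-- _RULES = [
--     (['pharma'], 'Pharmaceutical Sector stock'),
--     (['bank'], 'Banking Sector stock'),
--     (['it', 'tech'], 'Technology Sector stock'),
--     (['gold'], 'Gold Commodity stock'),
--     (['oil', 'energy'], 'Oil & Gas Sector stock'),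
--     (['metal'], 'Metal & Mining Sector stock'),
--     (['infra'], 'Infrastructure Sector stock'),
--     (['defence', 'defense'], 'Defence Sector stock'),
--     (['midcap', 'mid'], 'Mid Cap stock'),
--     (['smallcap', 'small'], 'Small Cap stock'),
--     (['liquid'], 'Liquid Fund stock'),
--     (['nifty'], 'Nifty Index stock'),
--     (['sensex'], 'Sensex Index stock'),
--     (['psu'], 'PSU Sector stock'),
--     (['cpse'], 'CPSE stock'),
--     (['dividend'], 'Dividend stock'),
--     (['momentum'], 'Momentum stock'),
--     (['value'], 'Value stock'),
--     (['quality'], 'Quality stock'),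
--     (['us', 'usa', 'nasdaq', 'sp500', 'dow'], 'International stock'),
--     (['consumption', 'consumer'], 'Consumer Sector stock'),
--     (['auto'], 'Automotive Sector stock'),
--     (['realty', 'real'], 'Real Estate stock'),
--     (['healthcare', 'health'], 'Healthcare Sector stock'),
--     (['fmcg'], 'FMCG Sector stock'),
--     (['pvt', 'private'], 'Private Bank stock'),
-- ]
--
-- # keyword -> (rule priority, description); all 38 keywords are distinct.
-- _KEYWORDS = {kw: (prio, desc)
--              for prio, (subs, desc) in enumerate(_RULES)
--              for kw in subs}
-- _MAXLEN = 11  # length of the longest keyword ('consumption')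
--
--
-- def generate_stock_description(symbol: str) -> str:
--     """Generate intelligent stock descriptions based on symbol names.
--
--     Instead of testing every keyword against the symbol, slide over the
--     lowercased symbol and hash each bounded-length substring into the
--     keyword index, keeping the hit of highest priority (lowest rule number).
--     This is correct because a keyword matches iff it occurs as such a
--     substring, and the first matching rule is the one of minimal number.
--     """
--     hit = _EXACT.get(symbol)
--     if hit is not None:
--         return hit
--
--     sl = symbol.lower()
--     n = len(sl)
--     best = None
--     for i in range(n):
--         for j in range(i + 1, min(i + _MAXLEN, n) + 1):
--             e = _KEYWORDS.get(sl[i:j])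
--             if e is not None and (best is None or e[0] < best[0]):
--                 best = e
--     return best[1] if best is not None else f'{symbol} stock'
-- ===== Notes on version B (the rewrite author's own statement) =====
-- stated objective: alternative
-- what changed: Inverts the search: instead of testing each of the 38 keywords against the symbol through a 26-branch if/elif cascade, B builds a keyword->(priority,description) hash index once and slides over the lowercased symbol, hashing every substring of length <= 11 and keeping the hit of minimal rule priority.
import Mathlib
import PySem

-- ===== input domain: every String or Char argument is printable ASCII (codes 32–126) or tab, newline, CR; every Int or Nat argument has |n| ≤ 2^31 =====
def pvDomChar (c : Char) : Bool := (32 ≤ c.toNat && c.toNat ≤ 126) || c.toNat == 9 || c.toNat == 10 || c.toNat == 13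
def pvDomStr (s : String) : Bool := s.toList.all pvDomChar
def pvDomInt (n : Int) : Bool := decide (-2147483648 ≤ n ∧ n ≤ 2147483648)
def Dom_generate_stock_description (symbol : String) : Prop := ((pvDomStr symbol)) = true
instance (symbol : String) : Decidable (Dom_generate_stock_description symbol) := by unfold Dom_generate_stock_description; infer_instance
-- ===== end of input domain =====

-- B inverts the search: a keyword->(priority,description) hash index is built once and every
-- bounded-length substring of the lowercased symbol is hashed into it, keeping the hit of
-- minimal rule priority, instead of A's 26-branch keyword-by-keyword if/elif cascade.

-- ===== PORT A =====
def pvStockMappings : PySem.Dict String String :=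
  PySem.Dict.ofList
  [("NIFTYBEES", "Nifty 50 stock - Broad Market"),
   ("BANKBEES", "Banking Sector stock"),
   ("JUNIORBEES", "Nifty Next 50 stock - Mid Cap"),
   ("ITBEES", "Information Technology stock"),
   ("PHARMABEES", "Pharmaceutical Sector stock"),
   ("INFRABEES", "Infrastructure Sector stock"),
   ("GOLDBEES", "Gold Commodity stock"),
   ("METALIstock", "Metal & Mining Sector stock"),
   ("OILIstock", "Oil & Gas Sector stock"),
   ("LIQUIDBEES", "Liquid Fund stock - Money Market"),
   ("CPSEstock", "CPSE (Central PSE) stock"),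
   ("PSUBNKBEES", "PSU Banking stock"),
   ("MON100", "NASDAQ 100 stock - US Tech"),
   ("MODEFENCE", "Defence Sector stock"),
   ("MIDCAPstock", "Mid Cap stock")]

def generate_stock_description (symbol : String) : String :=
  if PySem.Dict.contains pvStockMappings symbol then
    (PySem.Dict.get? pvStockMappings symbol).getD ""   -- lookup after a successful membership test; getD unreachable default
  else
    let sl := PySem.Str.lower symbol
    if PySem.Str.isIn "pharma" sl then "Pharmaceutical Sector stock"
    else if PySem.Str.isIn "bank" sl then "Banking Sector stock"
    else if PySem.Str.isIn "it" sl || PySem.Str.isIn "tech" sl then "Technology Sector stock"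
    else if PySem.Str.isIn "gold" sl then "Gold Commodity stock"
    else if PySem.Str.isIn "oil" sl || PySem.Str.isIn "energy" sl then "Oil & Gas Sector stock"
    else if PySem.Str.isIn "metal" sl then "Metal & Mining Sector stock"
    else if PySem.Str.isIn "infra" sl then "Infrastructure Sector stock"
    else if PySem.Str.isIn "defence" sl || PySem.Str.isIn "defense" sl then "Defence Sector stock"
    else if PySem.Str.isIn "midcap" sl || PySem.Str.isIn "mid" sl then "Mid Cap stock"
    else if PySem.Str.isIn "smallcap" sl || PySem.Str.isIn "small" sl then "Small Cap stock"
    else if PySem.Str.isIn "liquid" sl then "Liquid Fund stock"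
    else if PySem.Str.isIn "nifty" sl then "Nifty Index stock"
    else if PySem.Str.isIn "sensex" sl then "Sensex Index stock"
    else if PySem.Str.isIn "psu" sl then "PSU Sector stock"
    else if PySem.Str.isIn "cpse" sl then "CPSE stock"
    else if PySem.Str.isIn "dividend" sl then "Dividend stock"
    else if PySem.Str.isIn "momentum" sl then "Momentum stock"
    else if PySem.Str.isIn "value" sl then "Value stock"
    else if PySem.Str.isIn "quality" sl then "Quality stock"
    else if ["us", "usa", "nasdaq", "sp500", "dow"].any (fun geo => PySem.Str.isIn geo sl) then "International stock"
    else if PySem.Str.isIn "consumption" sl || PySem.Str.isIn "consumer" sl then "Consumer Sector stock"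
    else if PySem.Str.isIn "auto" sl then "Automotive Sector stock"
    else if PySem.Str.isIn "realty" sl || PySem.Str.isIn "real" sl then "Real Estate stock"
    else if PySem.Str.isIn "healthcare" sl || PySem.Str.isIn "health" sl then "Healthcare Sector stock"
    else if PySem.Str.isIn "fmcg" sl then "FMCG Sector stock"
    else if PySem.Str.isIn "pvt" sl || PySem.Str.isIn "private" sl then "Private Bank stock"
    else symbol ++ " stock"

-- ===== PORT B =====
def pvRulesB : List (List String × String) :=
  [(["pharma"], "Pharmaceutical Sector stock"),
   (["bank"], "Banking Sector stock"),
   (["it", "tech"], "Technology Sector stock"),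
   (["gold"], "Gold Commodity stock"),
   (["oil", "energy"], "Oil & Gas Sector stock"),
   (["metal"], "Metal & Mining Sector stock"),
   (["infra"], "Infrastructure Sector stock"),
   (["defence", "defense"], "Defence Sector stock"),
   (["midcap", "mid"], "Mid Cap stock"),
   (["smallcap", "small"], "Small Cap stock"),
   (["liquid"], "Liquid Fund stock"),
   (["nifty"], "Nifty Index stock"),
   (["sensex"], "Sensex Index stock"),
   (["psu"], "PSU Sector stock"),
   (["cpse"], "CPSE stock"),
   (["dividend"], "Dividend stock"),
   (["momentum"], "Momentum stock"),
   (["value"], "Value stock"),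
   (["quality"], "Quality stock"),
   (["us", "usa", "nasdaq", "sp500", "dow"], "International stock"),
   (["consumption", "consumer"], "Consumer Sector stock"),
   (["auto"], "Automotive Sector stock"),
   (["realty", "real"], "Real Estate stock"),
   (["healthcare", "health"], "Healthcare Sector stock"),
   (["fmcg"], "FMCG Sector stock"),
   (["pvt", "private"], "Private Bank stock")]

-- Source B's dict comprehension {kw: (prio, desc) for prio, (subs, desc) in enumerate(_RULES) for kw in subs}
def pvKwPairs : List (String × (Nat × String)) :=
  (pvRulesB.zipIdx.flatMap (fun rp => rp.1.1.map (fun kw => (kw, (rp.2, rp.1.2)))))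

def pvKeywords : PySem.Dict String (Nat × String) := PySem.Dict.ofList pvKwPairs

-- the nested 'for i in range(n): for j in range(i+1, min(i+11, n)+1)' loop of Source B
def generate_stock_description_alt (symbol : String) : String :=
  match PySem.Dict.get? pvStockMappings symbol with
  | some hit => hit
  | none =>
      let sl := PySem.Str.lower symbol
      let n : Int := PySem.Str.len sl
      let best : Option (Nat × String) :=
        (PySem.List.pyRange 0 n 1).foldl (fun best i =>
          (PySem.List.pyRange (i+1) (min (i+11) n + 1) 1).foldl (fun best j =>
            match PySem.Dict.get? pvKeywords (PySem.Str.slice sl (some i) (some j)) with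
            | some e => match best with
                        | none => some e
                        | some b => if e.1 < b.1 then some e else some b
            | none => best) best) none
      match best with
      | some b => b.2
      | none => symbol ++ " stock"

-- ===== PRECONDITION & SPEC =====
def Spec_generate_stock_description (symbol : String) (out : String) : Prop := out = generate_stock_description_alt symbol
instance (symbol : String) (out : String) : Decidable (Spec_generate_stock_description symbol out) := by unfold Spec_generate_stock_description; infer_instance

-- ===== CLAIM (what is proved, stated in full; the proofs are below) =====
def Claim_equal_generate_stock_description : Prop := ∀ (symbol : String), Dom_generate_stock_description symbol → Spec_generate_stock_description symbol (generate_stock_description symbol)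

-- ===== LEMMAS AND PROOFS =====

-- min-accumulator combining step of Source B's loop body
def pvCombine (b o : Option (Nat × String)) : Option (Nat × String) :=
  match o with
  | none => b
  | some e => match b with
              | none => some e
              | some b' => if e.1 < b'.1 then some e else some b'

-- the flat candidate stream the nested loops of Source B visit
def pvCands (sl : String) : List (Option (Nat × String)) :=
  (PySem.List.pyRange 0 (PySem.Str.len sl) 1).flatMap (fun i =>
    (PySem.List.pyRange (i+1) (min (i+11) (PySem.Str.len sl) + 1) 1).map (fun j =>
      PySem.Dict.get? pvKeywords (PySem.Str.slice sl (some i) (some j))))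

-- the rule-matching predicate of A's cascade
def pvMatch (sl : String) (r : List String × String) : Bool :=
  r.1.any (fun kw => PySem.Str.isIn kw sl)

-- ghost first-match scan both ports are related to
def pvScan (rules : List (List String × String)) (sl : String) : Option String :=
  match rules with
  | [] => none
  | r :: rest => if pvMatch sl r then some r.2 else pvScan rest sl

theorem pvContains_get (symbol : String) :
    PySem.Dict.contains pvStockMappings symbol = (PySem.Dict.get? pvStockMappings symbol).isSome :=
  PySem.Dict.contains_eq_isSome_get? _ _

theorem pvFoldl_flatMap {α β γ : Type} (l : List α) (g : α → List β) (f : γ → β → γ) (a : γ) :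
    (l.flatMap g).foldl f a = l.foldl (fun a i => (g i).foldl f a) a := by
  induction l generalizing a with
  | nil => simp
  | cons x xs ih => simp [List.foldl_append, ih]

theorem pvFold_eq_cands (sl : String) :
    (PySem.List.pyRange 0 (PySem.Str.len sl) 1).foldl (fun best i =>
      (PySem.List.pyRange (i+1) (min (i+11) (PySem.Str.len sl) + 1) 1).foldl (fun best j =>
        match PySem.Dict.get? pvKeywords (PySem.Str.slice sl (some i) (some j)) with
        | some e => match best with
                    | none => some e
                    | some b => if e.1 < b.1 then some e else some b
        | none => best) best) none
    = (pvCands sl).foldl pvCombine none := by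
  unfold pvCands
  rw [pvFoldl_flatMap]
  apply List.foldl_ext
  intro a b _
  rw [List.foldl_map]
  apply List.foldl_ext
  intro a' b' _
  cases PySem.Dict.get? pvKeywords (PySem.Str.slice sl (some b) (some b')) <;> cases a' <;> rfl

theorem pvCombine_none_iff (a o : Option (Nat × String)) :
    pvCombine a o = none ↔ a = none ∧ o = none := by
  cases a <;> cases o <;> simp [pvCombine] <;> split <;> simp

theorem pvCombine_cases (a o : Option (Nat × String)) (e : Nat × String)
    (h : pvCombine a o = some e) : some e = a ∨ some e = o := by
  cases o with
  | none => exact Or.inl h.symm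
  | some e' =>
    cases a with
    | none => exact Or.inr h.symm
    | some b' =>
      simp only [pvCombine] at h
      split at h
      · exact Or.inr h.symm
      · exact Or.inl h.symm

theorem pvCombine_le (a o : Option (Nat × String)) (e b : Nat × String)
    (h : pvCombine a o = some e) (hb : some b = a ∨ some b = o) : e.1 ≤ b.1 := by
  cases o with
  | none =>
    rcases hb with hb | hb
    · rw [← hb] at h; cases h; exact le_refl _
    · cases hb
  | some e' =>
    cases a with
    | none =>
      rcases hb with hb | hb
      · cases hb
      · cases hb; cases h; exact le_refl _
    | some b' =>
      simp only [pvCombine] at h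
      split at h <;> rename_i hlt <;> cases h <;> rcases hb with hb | hb <;>
        (try cases hb) <;> omega

theorem pvFold_spec (os : List (Option (Nat × String))) (acc : Option (Nat × String))
    (e : Nat × String) (h : os.foldl pvCombine acc = some e) :
    (some e = acc ∨ some e ∈ os) ∧ (∀ b : Nat × String, (some b = acc ∨ some b ∈ os) → e.1 ≤ b.1) := by
  induction os generalizing acc with
  | nil =>
    simp only [List.foldl_nil] at h
    refine ⟨Or.inl h.symm, ?_⟩
    rintro b (hb | hb)
    · rw [h] at hb; cases hb; exact le_refl _
    · simp at hb
  | cons o os ih =>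
    simp only [List.foldl_cons] at h
    obtain ⟨hmem, hmin⟩ := ih (pvCombine acc o) h
    constructor
    · rcases hmem with hm | hm
      · rcases pvCombine_cases _ _ _ hm.symm with h' | h'
        · exact Or.inl h'
        · exact Or.inr (by simp [← h'])
      · exact Or.inr (List.mem_cons_of_mem _ hm)
    · rintro b (hb | hb)
      · rcases hc : pvCombine acc o with _ | c
        · rw [pvCombine_none_iff] at hc; rw [hc.1] at hb; cases hb
        · have h1 : e.1 ≤ c.1 := hmin c (Or.inl hc.symm)
          have h2 : c.1 ≤ b.1 := pvCombine_le acc o c b hc (Or.inl hb)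
          omega
      · rcases List.mem_cons.mp hb with hb' | hb'
        · rcases hc : pvCombine acc o with _ | c
          · rw [pvCombine_none_iff] at hc; rw [hc.2] at hb'; cases hb'
          · have h1 : e.1 ≤ c.1 := hmin c (Or.inl hc.symm)
            have h2 : c.1 ≤ b.1 := pvCombine_le acc o c b hc (Or.inr hb'.symm.symm)
            omega
        · exact hmin b (Or.inr hb')

theorem pvFold_none_iff (os : List (Option (Nat × String))) (acc : Option (Nat × String)) :
    os.foldl pvCombine acc = none ↔ acc = none ∧ ∀ o ∈ os, o = none := by
  induction os generalizing acc with
  | nil => simp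
  | cons o os ih =>
    simp only [List.foldl_cons, ih, pvCombine_none_iff, List.mem_cons]
    constructor
    · rintro ⟨⟨h1, h2⟩, h3⟩
      refine ⟨h1, ?_⟩
      rintro o' (rfl | ho')
      · exact h2
      · exact h3 o' ho'
    · rintro ⟨h1, h2⟩
      exact ⟨⟨h1, h2 o (Or.inl rfl)⟩, fun o' ho' => h2 o' (Or.inr ho')⟩

theorem pvGet?_mk_mem {κ ν : Type} [BEq κ] [LawfulBEq κ] (ps : List (κ × ν)) (k : κ) (v : ν)
    (h : (PySem.Dict.mk ps).get? k = some v) : (k, v) ∈ ps := by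
  induction ps with
  | nil => simp [PySem.Dict.get?] at h
  | cons p ps ih =>
    obtain ⟨pk, pv⟩ := p
    rw [PySem.Dict.get?_mk_cons] at h
    by_cases hk : (pk == k) = true
    · rw [if_pos hk] at h
      cases h
      have hk' : pk = k := eq_of_beq hk
      subst hk'
      exact List.mem_cons_self
    · rw [if_neg hk] at h
      exact List.mem_cons_of_mem _ (ih h)

set_option maxRecDepth 100000 in
theorem pvKeywords_eq_mk : pvKeywords = PySem.Dict.mk pvKwPairs := by rfl

theorem pvGet?_kw_mem (k : String) (v : Nat × String)
    (h : PySem.Dict.get? pvKeywords k = some v) : (k, v) ∈ pvKwPairs := by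
  rw [pvKeywords_eq_mk] at h
  exact pvGet?_mk_mem _ _ _ h

-- structure of the keyword index: every entry points back into its rule (checked by computation)
set_option maxRecDepth 100000 in
theorem pvKwPairs_rules : ∀ p ∈ pvKwPairs,
    p.2.1 < pvRulesB.length ∧ (pvRulesB.getD p.2.1 ([], "")).2 = p.2.2 ∧
      p.1 ∈ (pvRulesB.getD p.2.1 ([], "")).1 := by decide

theorem pvLen_eq (sl : String) : PySem.Str.len sl = (sl.toList.length : Int) := by
  simp [PySem.Str.len]

theorem pvSliceInfix (sl : String) (i j : Int) (hi : 0 ≤ i) (hj : 0 ≤ j) :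
    (PySem.Str.slice sl (some i) (some j)).toList <:+: sl.toList := by
  rw [PySem.Str.toList_slice, PySem.Chars.slice_eq_listSlice, PySem.List.slice_toNat _ hi hj]
  exact ((List.take_prefix _ _).isInfix).trans (sl.toList.drop_suffix i.toNat).isInfix

theorem pvCands_sound (sl : String) (o : Option (Nat × String)) (ho : o ∈ pvCands sl)
    (e : Nat × String) (he : o = some e) :
    ∃ kw : String, (kw, e) ∈ pvKwPairs ∧ PySem.Str.isIn kw sl = true := by
  unfold pvCands at ho
  rw [List.mem_flatMap] at ho
  obtain ⟨i, hi, ho⟩ := ho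
  rw [List.mem_map] at ho
  obtain ⟨j, hj, ho⟩ := ho
  rw [PySem.List.mem_pyRange_one] at hi hj
  rw [he] at ho
  refine ⟨PySem.Str.slice sl (some i) (some j), pvGet?_kw_mem _ _ ho, ?_⟩
  rw [PySem.Str.isIn_iff_infix]
  exact pvSliceInfix sl i j (by omega) (by omega)

-- a matching bounded-length keyword that is in the index yields a visited candidate
theorem pvCand_of_isIn (sl kw : String) (e : Nat × String)
    (h : PySem.Dict.get? pvKeywords kw = some e)
    (hlen1 : 1 ≤ kw.toList.length) (hlen11 : kw.toList.length ≤ 11)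
    (hin : PySem.Str.isIn kw sl = true) : some e ∈ pvCands sl := by
  rw [PySem.Str.isIn_iff_infix] at hin
  have hin' : PySem.Chars.isIn kw.toList sl.toList = true :=
    (PySem.Chars.isIn_iff_infix _ _).mpr hin
  obtain ⟨a, ha⟩ := (PySem.Chars.exists_prefix_drop_iff_isIn kw.toList sl.toList).mpr hin'
  have hlen : kw.toList.length ≤ (sl.toList.drop a).length := ha.length_le
  rw [List.length_drop] at hlen
  have haL : a + kw.toList.length ≤ sl.toList.length := by omega
  unfold pvCands
  rw [List.mem_flatMap]
  refine ⟨(a : Int), ?_, ?_⟩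
  · rw [PySem.List.mem_pyRange_one, pvLen_eq]
    constructor
    · omega
    · push_cast
      omega
  · rw [List.mem_map]
    refine ⟨((a + kw.toList.length : Nat) : Int), ?_, ?_⟩
    · rw [PySem.List.mem_pyRange_one, pvLen_eq]
      constructor
      · push_cast; omega
      · push_cast; omega
    · have hsl : PySem.Str.slice sl (some (a : Int)) (some ((a + kw.toList.length : Nat) : Int)) = kw := by
        rw [← String.toList_inj, PySem.Str.toList_slice, PySem.Chars.slice_eq_listSlice,
          PySem.List.slice_toNat _ (by omega) (by omega)]
        have h1 : ((a : Int)).toNat = a := by omega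
        have h2 : (((a + kw.toList.length : Nat) : Int)).toNat = a + kw.toList.length := by omega
        rw [h1, h2]
        have h3 : a + kw.toList.length - a = kw.toList.length := by omega
        rw [h3]
        exact (List.prefix_iff_eq_take.mp ha).symm
      rw [hsl, h]

theorem pvFindIdx_le {α : Type} (p : α → Bool) (l : List α) (i : Nat) (hi : i < l.length)
    (hp : p l[i] = true) : l.findIdx p ≤ i := by
  by_contra hlt
  have hlt' : i < l.findIdx p := by omega
  exact absurd hp (by simpa using List.not_of_lt_findIdx hlt')

-- matched rules give candidates: instantiated at each of the 26 rules
set_option maxRecDepth 100000 in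
theorem pvComplete (sl : String) (k : Nat) (hk : k < pvRulesB.length)
    (hm : pvMatch sl (pvRulesB[k]) = true) :
    some (k, (pvRulesB[k]).2) ∈ pvCands sl := by
  have hlen : pvRulesB.length = 26 := by decide
  rw [hlen] at hk
  unfold pvMatch at hm
  interval_cases k <;>
    simp only [pvRulesB, List.getElem_cons_zero, List.getElem_cons_succ, List.any_cons,
      List.any_nil, Bool.or_false, Bool.or_eq_true] at hm ⊢ <;>
    first
    | (exact pvCand_of_isIn _ _ _ (by decide) (by decide) (by decide) hm)
    | (rcases hm with hm | hm
       · exact pvCand_of_isIn _ _ _ (by decide) (by decide) (by decide) hm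
       · exact pvCand_of_isIn _ _ _ (by decide) (by decide) (by decide) hm)
    | (rcases hm with hm | hm | hm | hm | hm <;>
         exact pvCand_of_isIn _ _ _ (by decide) (by decide) (by decide) hm)

-- the candidate of minimal priority is exactly the first matching rule
theorem pvFold_main (sl : String) :
    (pvCands sl).foldl pvCombine none =
      if h : pvRulesB.findIdx (pvMatch sl) < pvRulesB.length
      then some (pvRulesB.findIdx (pvMatch sl), (pvRulesB[pvRulesB.findIdx (pvMatch sl)]).2)
      else none := by
  split
  next h =>
    have hm : pvMatch sl (pvRulesB[pvRulesB.findIdx (pvMatch sl)]) = true := by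
      simpa using List.findIdx_getElem (w := h)
    have hc := pvComplete sl _ h hm
    rcases hr : (pvCands sl).foldl pvCombine none with _ | e
    · rw [pvFold_none_iff] at hr
      exact absurd (hr.2 _ hc) (by simp)
    · obtain ⟨hmem, hmin⟩ := pvFold_spec _ _ _ hr
      rcases hmem with hmem | hmem
      · exact absurd hmem (by simp)
      obtain ⟨kw, hkw, hin⟩ := pvCands_sound sl _ hmem e rfl
      obtain ⟨hlt, hd, hkwin⟩ := pvKwPairs_rules _ hkw
      have hmatched : pvMatch sl (pvRulesB[e.1]) = true := by
        unfold pvMatch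
        rw [List.any_eq_true]
        refine ⟨kw, ?_, hin⟩
        rw [← List.getD_eq_getElem pvRulesB ([], "") hlt]
        exact hkwin
      have hle : pvRulesB.findIdx (pvMatch sl) ≤ e.1 := pvFindIdx_le _ _ _ hlt hmatched
      have hge : e.1 ≤ pvRulesB.findIdx (pvMatch sl) := hmin _ (Or.inr hc)
      have heq : e.1 = pvRulesB.findIdx (pvMatch sl) := by omega
      have he2 : e.2 = (pvRulesB[pvRulesB.findIdx (pvMatch sl)]).2 := by
        rw [← hd, List.getD_eq_getElem pvRulesB ([], "") hlt]
        congr 2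
      have he : e = (pvRulesB.findIdx (pvMatch sl), (pvRulesB[pvRulesB.findIdx (pvMatch sl)]).2) :=
        Prod.ext_iff.mpr ⟨heq, he2⟩
      rw [← he]
  next h =>
    have hall : ∀ r ∈ pvRulesB, pvMatch sl r = false := by
      apply List.findIdx_eq_length.mp
      have := List.findIdx_le_length (p := pvMatch sl) (xs := pvRulesB)
      omega
    rw [pvFold_none_iff]
    refine ⟨rfl, ?_⟩
    intro o ho
    rcases he : o with _ | e
    · rfl
    · exfalso
      obtain ⟨kw, hkw, hin⟩ := pvCands_sound sl o ho e he
      obtain ⟨hlt, hd, hkwin⟩ := pvKwPairs_rules _ hkw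
      have hf := hall (pvRulesB[e.1]) (List.getElem_mem hlt)
      unfold pvMatch at hf
      rw [List.any_eq_false] at hf
      have hmem' : kw ∈ (pvRulesB[e.1]).1 := by
        rw [← List.getD_eq_getElem pvRulesB ([], "") hlt]
        exact hkwin
      exact hf kw hmem' hin

theorem pvScan_eq_findIdx (rules : List (List String × String)) (sl : String) :
    pvScan rules sl =
      if h : rules.findIdx (pvMatch sl) < rules.length
      then some (rules[rules.findIdx (pvMatch sl)]).2
      else none := by
  induction rules with
  | nil => simp [pvScan]
  | cons r rest ih =>
    by_cases hr : pvMatch sl r = true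
    · simp [pvScan, List.findIdx_cons, hr]
    · simp only [Bool.not_eq_true] at hr
      rw [pvScan, ih]
      simp only [List.findIdx_cons, hr, cond_false, Bool.false_eq_true, if_false]
      by_cases h2 : rest.findIdx (pvMatch sl) < rest.length
      · rw [dif_pos h2, dif_pos (by simp only [List.length_cons]; omega)]
        simp
      · rw [dif_neg h2, dif_neg (by simp only [List.length_cons]; omega)]
-- A's cascade returns the first matching rule's description (26-way case split)
theorem pvCascade_eq_scan (symbol : String) (h : PySem.Dict.get? pvStockMappings symbol = none) :
    generate_stock_description symbol =
      (match pvScan pvRulesB (PySem.Str.lower symbol) with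
       | some d => d
       | none => symbol ++ " stock") := by
  unfold generate_stock_description
  rw [pvContains_get, h]
  simp only [Option.isSome_none, Bool.false_eq_true, if_neg, not_false_eq_true]
  unfold pvRulesB
  simp only [pvScan, pvMatch]
  simp only [List.any_cons, List.any_nil, Bool.or_false]
  by_cases h1 : (PySem.Str.isIn "pharma" (PySem.Str.lower symbol)) = true
  · simp only [if_pos h1]
  simp only [if_neg h1]
  by_cases h2 : (PySem.Str.isIn "bank" (PySem.Str.lower symbol)) = true
  · simp only [if_pos h2]
  simp only [if_neg h2]
  by_cases h3 : (PySem.Str.isIn "it" (PySem.Str.lower symbol) || PySem.Str.isIn "tech" (PySem.Str.lower symbol)) = true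
  · simp only [if_pos h3]
  simp only [if_neg h3]
  by_cases h4 : (PySem.Str.isIn "gold" (PySem.Str.lower symbol)) = true
  · simp only [if_pos h4]
  simp only [if_neg h4]
  by_cases h5 : (PySem.Str.isIn "oil" (PySem.Str.lower symbol) || PySem.Str.isIn "energy" (PySem.Str.lower symbol)) = true
  · simp only [if_pos h5]
  simp only [if_neg h5]
  by_cases h6 : (PySem.Str.isIn "metal" (PySem.Str.lower symbol)) = true
  · simp only [if_pos h6]
  simp only [if_neg h6]
  by_cases h7 : (PySem.Str.isIn "infra" (PySem.Str.lower symbol)) = true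
  · simp only [if_pos h7]
  simp only [if_neg h7]
  by_cases h8 : (PySem.Str.isIn "defence" (PySem.Str.lower symbol) || PySem.Str.isIn "defense" (PySem.Str.lower symbol)) = true
  · simp only [if_pos h8]
  simp only [if_neg h8]
  by_cases h9 : (PySem.Str.isIn "midcap" (PySem.Str.lower symbol) || PySem.Str.isIn "mid" (PySem.Str.lower symbol)) = true
  · simp only [if_pos h9]
  simp only [if_neg h9]
  by_cases h10 : (PySem.Str.isIn "smallcap" (PySem.Str.lower symbol) || PySem.Str.isIn "small" (PySem.Str.lower symbol)) = true
  · simp only [if_pos h10]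
  simp only [if_neg h10]
  by_cases h11 : (PySem.Str.isIn "liquid" (PySem.Str.lower symbol)) = true
  · simp only [if_pos h11]
  simp only [if_neg h11]
  by_cases h12 : (PySem.Str.isIn "nifty" (PySem.Str.lower symbol)) = true
  · simp only [if_pos h12]
  simp only [if_neg h12]
  by_cases h13 : (PySem.Str.isIn "sensex" (PySem.Str.lower symbol)) = true
  · simp only [if_pos h13]
  simp only [if_neg h13]
  by_cases h14 : (PySem.Str.isIn "psu" (PySem.Str.lower symbol)) = true
  · simp only [if_pos h14]
  simp only [if_neg h14]
  by_cases h15 : (PySem.Str.isIn "cpse" (PySem.Str.lower symbol)) = true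
  · simp only [if_pos h15]
  simp only [if_neg h15]
  by_cases h16 : (PySem.Str.isIn "dividend" (PySem.Str.lower symbol)) = true
  · simp only [if_pos h16]
  simp only [if_neg h16]
  by_cases h17 : (PySem.Str.isIn "momentum" (PySem.Str.lower symbol)) = true
  · simp only [if_pos h17]
  simp only [if_neg h17]
  by_cases h18 : (PySem.Str.isIn "value" (PySem.Str.lower symbol)) = true
  · simp only [if_pos h18]
  simp only [if_neg h18]
  by_cases h19 : (PySem.Str.isIn "quality" (PySem.Str.lower symbol)) = true
  · simp only [if_pos h19]
  simp only [if_neg h19]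
  by_cases h20 : (PySem.Str.isIn "us" (PySem.Str.lower symbol) || (PySem.Str.isIn "usa" (PySem.Str.lower symbol) || (PySem.Str.isIn "nasdaq" (PySem.Str.lower symbol) || (PySem.Str.isIn "sp500" (PySem.Str.lower symbol) || PySem.Str.isIn "dow" (PySem.Str.lower symbol))))) = true
  · simp only [if_pos h20]
  simp only [if_neg h20]
  by_cases h21 : (PySem.Str.isIn "consumption" (PySem.Str.lower symbol) || PySem.Str.isIn "consumer" (PySem.Str.lower symbol)) = true
  · simp only [if_pos h21]
  simp only [if_neg h21]
  by_cases h22 : (PySem.Str.isIn "auto" (PySem.Str.lower symbol)) = true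
  · simp only [if_pos h22]
  simp only [if_neg h22]
  by_cases h23 : (PySem.Str.isIn "realty" (PySem.Str.lower symbol) || PySem.Str.isIn "real" (PySem.Str.lower symbol)) = true
  · simp only [if_pos h23]
  simp only [if_neg h23]
  by_cases h24 : (PySem.Str.isIn "healthcare" (PySem.Str.lower symbol) || PySem.Str.isIn "health" (PySem.Str.lower symbol)) = true
  · simp only [if_pos h24]
  simp only [if_neg h24]
  by_cases h25 : (PySem.Str.isIn "fmcg" (PySem.Str.lower symbol)) = true
  · simp only [if_pos h25]
  simp only [if_neg h25]
  by_cases h26 : (PySem.Str.isIn "pvt" (PySem.Str.lower symbol) || PySem.Str.isIn "private" (PySem.Str.lower symbol)) = true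
  · simp only [if_pos h26]
  simp only [if_neg h26]

theorem pvAlt_eq_scan (symbol : String) (h : PySem.Dict.get? pvStockMappings symbol = none) :
    generate_stock_description_alt symbol =
      (match pvScan pvRulesB (PySem.Str.lower symbol) with
       | some d => d
       | none => symbol ++ " stock") := by
  unfold generate_stock_description_alt
  rw [h]
  dsimp only
  rw [pvFold_eq_cands, pvFold_main, pvScan_eq_findIdx]
  by_cases h2 : pvRulesB.findIdx (pvMatch (PySem.Str.lower symbol)) < pvRulesB.length
  · rw [dif_pos h2, dif_pos h2]
  · rw [dif_neg h2, dif_neg h2]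

-- ===== VERDICT (by name: the statement is the Claim_ definition above) =====
theorem generate_stock_description_spec : Claim_equal_generate_stock_description := by
  intro symbol _
  unfold Spec_generate_stock_description
  rcases h : PySem.Dict.get? pvStockMappings symbol with _ | v
  · rw [pvCascade_eq_scan symbol h, pvAlt_eq_scan symbol h]
  · unfold generate_stock_description generate_stock_description_alt
    rw [pvContains_get, h]
    simp
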